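-- pv_equiv track=rewrite | github.com/sandeep-sala/Code | code-wars/Convert_integer_to_Whitespace_format.py | whitespace_number
-- ===== SOURCE A (Python) =====
-- def whitespace_number(n):
--     if n==0:
--         return " \n"
--     k,p = {"0":" ","1":"\t"},""
--     p+= "\t" if n<0 else " "
--     for i in f"{abs(n):b}":
--         p+=k[i]
--     return p+"\n"
-- ===== SOURCE B (Python) =====
-- def whitespace_number(n):
--     if n == 0:
--         return " \n"
--     m = abs(n)
--     bits = []
--     while m:
--         bits.append(m & 1)
--         m >>= 1
--     body = "".join(" " if b == 0 else "\t" for b in reversed(bits))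
--     return ("\t" if n < 0 else " ") + body + "\n"
-- ===== Notes on version B (the rewrite author's own statement) =====
-- stated objective: alternative
-- what changed: B extracts bits arithmetically with a division loop (LSB-first) and reverses them, instead of iterating over a pre-formatted binary string with a dict lookup per digit.
import Mathlib
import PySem

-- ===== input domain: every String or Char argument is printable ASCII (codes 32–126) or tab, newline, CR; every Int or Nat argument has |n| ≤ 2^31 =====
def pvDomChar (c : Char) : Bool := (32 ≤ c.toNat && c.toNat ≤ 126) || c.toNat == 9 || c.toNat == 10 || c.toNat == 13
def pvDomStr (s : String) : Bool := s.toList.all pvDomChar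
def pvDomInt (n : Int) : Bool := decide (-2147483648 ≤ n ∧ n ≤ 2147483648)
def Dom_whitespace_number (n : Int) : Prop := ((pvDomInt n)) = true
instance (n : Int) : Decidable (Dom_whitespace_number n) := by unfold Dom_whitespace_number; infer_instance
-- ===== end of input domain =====

-- B replaces A's format-string + per-digit dict lookup by an arithmetic division loop
-- collecting bits LSB-first and a reversal; same cost, different decomposition.

-- ===== PORT A =====
-- hand port of f"{m:b}" (MSB-first binary digit chars; exact for m > 0, the only
-- values A reaches it with)
def pvBinFmt (m : Nat) : List Char :=
  if m = 0 then []
  else pvBinFmt (m / 2) ++ [if m % 2 = 1 then '1' else '0']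
decreasing_by exact Nat.div_lt_self (Nat.pos_of_ne_zero (by assumption)) (by norm_num)

def whitespace_number (n : Int) : String :=
  if n == 0 then " \n"
  else
    -- Python iterates over the 1-char strings of the digit string; ported as Chars.
    -- k[i]: the key is always present ('0'/'1'), so getD with a dummy default is exact.
    let k : PySem.Dict Char String := PySem.Dict.ofList [('0', " "), ('1', "\t")]
    let p : String := ""
    let p := p ++ (if n < 0 then "\t" else " ")
    let p := (pvBinFmt n.natAbs).foldl (fun p i => p ++ k.getD i "") p
    p ++ "\n"

-- ===== PORT B =====
-- while m: bits.append(m & 1); m >>= 1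
def pvBitsLoop (m : Nat) (bits : List Int) : List Int :=
  if m = 0 then bits
  else pvBitsLoop (m / 2) (bits ++ [((m % 2 : Nat) : Int)])
decreasing_by exact Nat.div_lt_self (Nat.pos_of_ne_zero (by assumption)) (by norm_num)

def whitespace_number_alt (n : Int) : String :=
  if n == 0 then " \n"
  else
    let m := n.natAbs
    let bits := pvBitsLoop m []
    let body := PySem.Str.join "" (bits.reverse.map (fun b => if b = 0 then " " else "\t"))
    (if n < 0 then "\t" else " ") ++ body ++ "\n"

-- ===== PRECONDITION & SPEC =====
def Spec_whitespace_number (n : Int) (out : String) : Prop := out = whitespace_number_alt n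
instance (n : Int) (out : String) : Decidable (Spec_whitespace_number n out) := by unfold Spec_whitespace_number; infer_instance

-- ===== CLAIM (what is proved, stated in full; the proofs are below) =====
def Claim_equal_whitespace_number : Prop := ∀ (n : Int), Dom_whitespace_number n → Spec_whitespace_number n (whitespace_number n)

-- ===== LEMMAS AND PROOFS =====

-- LSB-first bit list: the structural form of B's accumulator loop
def pvLsb (m : Nat) : List Int :=
  if m = 0 then []
  else ((m % 2 : Nat) : Int) :: pvLsb (m / 2)
decreasing_by exact Nat.div_lt_self (Nat.pos_of_ne_zero (by assumption)) (by norm_num)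

theorem pvBitsLoop_eq (m : Nat) : ∀ bits, pvBitsLoop m bits = bits ++ pvLsb m := by
  induction m using Nat.strong_induction_on with
  | _ m ih =>
    intro bits
    rw [pvBitsLoop, pvLsb]
    by_cases h : m = 0
    · simp [h]
    · simp only [h, if_false]
      rw [ih (m / 2) (Nat.div_lt_self (Nat.pos_of_ne_zero h) (by norm_num))]
      simp

theorem pvLsb_reverse (m : Nat) :
    (pvLsb m).reverse.map (fun b => if b = 0 then ' ' else '\t')
      = (pvBinFmt m).map (fun c => if c = '0' then ' ' else '\t') := by
  induction m using Nat.strong_induction_on with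
  | _ m ih =>
    rw [pvLsb, pvBinFmt]
    by_cases h : m = 0
    · simp [h]
    · simp only [h, if_false, List.reverse_cons, List.map_append, List.map_cons, List.map_nil]
      rw [ih (m / 2) (Nat.div_lt_self (Nat.pos_of_ne_zero h) (by norm_num))]
      congr 1
      rcases Nat.mod_two_eq_zero_or_one m with h2 | h2 <;> simp [h2]

theorem pvFoldl_append (f : Char → String) (l : List Char) :
    ∀ s : String, l.foldl (fun p i => p ++ f i) s
      = s ++ String.ofList (l.flatMap (fun c => (f c).toList)) := by
  induction l with
  | nil => intro s; apply String.toList_inj.mp; simp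
  | cons c t ih =>
    intro s
    simp only [List.foldl_cons, List.flatMap_cons, ih]
    apply String.toList_inj.mp
    simp

theorem pvGetD_zero :
    (PySem.Dict.ofList [('0', " "), ('1', "\t")] : PySem.Dict Char String).getD '0' "" = " " := by
  rfl

theorem pvGetD_one :
    (PySem.Dict.ofList [('0', " "), ('1', "\t")] : PySem.Dict Char String).getD '1' "" = "\t" := by
  rfl

theorem pvFlatMap_binFmt (m : Nat) :
    (pvBinFmt m).flatMap (fun c =>
        ((PySem.Dict.ofList [('0', " "), ('1', "\t")] : PySem.Dict Char String).getD c "").toList)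
      = (pvBinFmt m).map (fun c => if c = '0' then ' ' else '\t') := by
  induction m using Nat.strong_induction_on with
  | _ m ih =>
    rw [pvBinFmt]
    by_cases h : m = 0
    · simp [h]
    · simp only [h, if_false, List.flatMap_append, List.map_append]
      rw [ih (m / 2) (Nat.div_lt_self (Nat.pos_of_ne_zero h) (by norm_num))]
      congr 1
      rcases Nat.mod_two_eq_zero_or_one m with h2 | h2 <;>
        simp [h2, pvGetD_zero, pvGetD_one]

theorem whitespace_number_spec : Claim_equal_whitespace_number := by
  intro n _
  unfold Spec_whitespace_number whitespace_number whitespace_number_alt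
  by_cases h0 : n = 0
  · simp [h0]
  · have hne : (n == 0) = false := by simp [h0]
    simp only [hne, Bool.false_eq_true, if_false]
    rw [pvBitsLoop_eq, List.nil_append, pvFoldl_append]
    apply String.toList_inj.mp
    simp only [String.toList_append, PySem.Str.toList_join, String.toList_ofList]
    rw [show ((pvLsb n.natAbs).reverse.map (fun b => if b = 0 then " " else "\t")).map String.toList
          = ((pvLsb n.natAbs).reverse.map (fun b => if b = 0 then ' ' else '\t')).map (fun c => [c]) by
        simp only [List.map_map]
        apply List.map_congr_left
        intro b _
        by_cases hb : b = 0 <;> simp [hb]]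
    have hsep : ("" : String).toList = [] := rfl
    rw [hsep, PySem.Chars.join_nil_singletons, pvLsb_reverse, pvFlatMap_binFmt]
    simp
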